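-- pv_equiv track=rewrite | github.com/RupankarNewGen/ITF_AL_Masraf_Classification | Geo_layout_codebase/Geo_LayoutLM-geo_code_latest_timeoptm_version_updated_apr22_sharing_backend/inference_main/code/model_inference_utill_code_from_khushal.py | update_text_and_conf
-- ===== SOURCE A (Python) =====
-- def update_text_and_conf(temp_text, text, temp_preds, pred, conf, temp_confs):
--     count = 0
--     for j in range(len(temp_text)):
--         if temp_preds[j] == pred:
--             text += temp_text[j].replace("##", "")
--             conf += temp_confs[j]
--             count+=1
--     return text, conf, count
-- ===== SOURCE B (Python) =====
-- def update_text_and_conf(temp_text, text, temp_preds, pred, conf, temp_confs):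
--     def solve(lo, hi):
--         # (text, conf, count) contribution of index range [lo, hi)
--         if hi - lo == 0:
--             return "", 0, 0
--         if hi - lo == 1:
--             if temp_preds[lo] == pred:
--                 return temp_text[lo].replace("##", ""), temp_confs[lo], 1
--             return "", 0, 0
--         mid = (lo + hi) // 2
--         lt, lc, lk = solve(lo, mid)
--         rt, rc, rk = solve(mid, hi)
--         return lt + rt, lc + rc, lk + rk
--     t, c, k = solve(0, len(temp_text))
--     return text + t, conf + c, k
-- ===== Notes on version B (the rewrite author's own statement) =====
-- stated objective: alternative
-- what changed: A is a single linear loop mutating text/conf/count together; B is a divide-and-conquer recursion that splits the index range in half, computes each half's (text, conf, count) contribution independently, and combines them with the monoid operation (concat, +, +).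
import Mathlib
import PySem

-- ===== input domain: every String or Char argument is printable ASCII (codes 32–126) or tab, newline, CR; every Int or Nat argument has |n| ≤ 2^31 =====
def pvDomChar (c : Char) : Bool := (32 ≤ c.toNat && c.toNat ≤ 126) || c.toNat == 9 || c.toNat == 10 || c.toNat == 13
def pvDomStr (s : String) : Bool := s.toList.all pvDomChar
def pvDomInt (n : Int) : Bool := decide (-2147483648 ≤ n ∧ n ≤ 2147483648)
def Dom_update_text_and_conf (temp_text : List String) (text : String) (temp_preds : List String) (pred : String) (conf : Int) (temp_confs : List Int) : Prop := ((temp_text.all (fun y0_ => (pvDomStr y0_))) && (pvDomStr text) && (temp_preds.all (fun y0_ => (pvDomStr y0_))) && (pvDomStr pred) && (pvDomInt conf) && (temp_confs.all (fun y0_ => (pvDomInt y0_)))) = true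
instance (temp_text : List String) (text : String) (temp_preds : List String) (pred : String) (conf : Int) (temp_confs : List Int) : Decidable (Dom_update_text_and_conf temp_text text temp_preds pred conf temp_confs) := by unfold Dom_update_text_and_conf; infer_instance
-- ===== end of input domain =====

-- B replaces A's single linear accumulation loop by a divide-and-conquer recursion that halves
-- the index range and combines the two halves' (text, conf, count) contributions; alternative decomposition, same cost.


-- ===== PORT A =====
def update_text_and_conf (temp_text : List String) (text : String) (temp_preds : List String) (pred : String) (conf : Int) (temp_confs : List Int) : String × Int × Int :=
  -- count = 0; for j in range(len(temp_text)): …   (pyGetD is exact under Pre_)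
  (PySem.List.pyRange 0 (temp_text.length : Int) 1).foldl
    (fun (st : String × Int × Int) j =>
      if PySem.List.pyGetD temp_preds j "" == pred then
        (st.1 ++ PySem.Str.replace (PySem.List.pyGetD temp_text j "") "##" "",
         st.2.1 + PySem.List.pyGetD temp_confs j 0,
         st.2.2 + 1)
      else st)
    (text, conf, 0)

-- ===== PORT B =====
-- solve(lo, hi) of Source B; lo, hi are Nat (solve is only ever called with 0 ≤ lo ≤ hi,
-- where Python's // 2 agrees with Nat division); indexing via pyGetD is exact under Pre_.
def pvSolveB (temp_text : List String) (temp_preds : List String) (pred : String) (temp_confs : List Int) (fuel lo hi : Nat) : String × Int × Int :=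
  if hi - lo = 0 then ("", 0, 0)
  else if hi - lo = 1 then
    if PySem.List.pyGetD temp_preds (lo : Int) "" == pred then
      (PySem.Str.replace (PySem.List.pyGetD temp_text (lo : Int) "") "##" "",
       PySem.List.pyGetD temp_confs (lo : Int) 0, 1)
    else ("", 0, 0)
  else
    match fuel with
    | 0 => ("", 0, 0)  -- unreachable: fuel ≥ hi - lo - 1 at every call
    | f + 1 =>
      let mid := (lo + hi) / 2
      let l := pvSolveB temp_text temp_preds pred temp_confs f lo mid
      let r := pvSolveB temp_text temp_preds pred temp_confs f mid hi
      (l.1 ++ r.1, l.2.1 + r.2.1, l.2.2 + r.2.2)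

def update_text_and_conf_alt (temp_text : List String) (text : String) (temp_preds : List String) (pred : String) (conf : Int) (temp_confs : List Int) : String × Int × Int :=
  let s := pvSolveB temp_text temp_preds pred temp_confs temp_text.length 0 temp_text.length
  (text ++ s.1, conf + s.2.1, s.2.2)

-- ===== PRECONDITION & SPEC =====
-- Pre_ excludes exactly the inputs where Python A raises IndexError: temp_preds shorter
-- than temp_text, or temp_confs too short at some matching index.
def Pre_update_text_and_conf (temp_text : List String) (text : String) (temp_preds : List String) (pred : String) (conf : Int) (temp_confs : List Int) : Prop :=
  temp_text.length ≤ temp_preds.length ∧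
  ∀ j ∈ List.range temp_text.length, (temp_preds.getD j "" == pred) = true → j < temp_confs.length
instance (temp_text : List String) (text : String) (temp_preds : List String) (pred : String) (conf : Int) (temp_confs : List Int) : Decidable (Pre_update_text_and_conf temp_text text temp_preds pred conf temp_confs) := by unfold Pre_update_text_and_conf; infer_instance
def pvWitness_update_text_and_conf : List String × String × List String × String × Int × List Int :=
  (["ab", "##c"], "x", ["p", "q"], "p", 3, [1, 2])

def Spec_update_text_and_conf (temp_text : List String) (text : String) (temp_preds : List String) (pred : String) (conf : Int) (temp_confs : List Int) (out : String × Int × Int) : Prop := out = update_text_and_conf_alt temp_text text temp_preds pred conf temp_confs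
instance (temp_text : List String) (text : String) (temp_preds : List String) (pred : String) (conf : Int) (temp_confs : List Int) (out : String × Int × Int) : Decidable (Spec_update_text_and_conf temp_text text temp_preds pred conf temp_confs out) := by unfold Spec_update_text_and_conf; infer_instance

-- ===== CLAIM (what is proved, stated in full; the proofs are below) =====
def Claim_equal_update_text_and_conf : Prop := ∀ (temp_text : List String) (text : String) (temp_preds : List String) (pred : String) (conf : Int) (temp_confs : List Int), Dom_update_text_and_conf temp_text text temp_preds pred conf temp_confs → Pre_update_text_and_conf temp_text text temp_preds pred conf temp_confs → Spec_update_text_and_conf temp_text text temp_preds pred conf temp_confs (update_text_and_conf temp_text text temp_preds pred conf temp_confs)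

-- ===== LEMMAS AND PROOFS =====

theorem chars_join_nil (l : List (List Char)) : PySem.Chars.join [] l = l.flatten := by
  simp only [PySem.Chars.join, List.intercalate]
  induction l with
  | nil => simp
  | cons a t ih => cases t <;> simp_all [List.intersperse]

theorem str_join_empty_nil : PySem.Str.join "" [] = "" := by
  apply String.ext
  simp [PySem.Str.toList_join]

theorem str_join_empty_cons (x : String) (xs : List String) :
    PySem.Str.join "" (x :: xs) = x ++ PySem.Str.join "" xs := by
  apply String.ext
  have h0 : ("" : String).toList = [] := rfl
  simp [PySem.Str.toList_join, h0, chars_join_nil]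

theorem str_join_empty_append (xs ys : List String) :
    PySem.Str.join "" (xs ++ ys) = PySem.Str.join "" xs ++ PySem.Str.join "" ys := by
  induction xs with
  | nil => simp [str_join_empty_nil]
  | cons a t ih => simp [str_join_empty_cons, ih, String.append_assoc]

-- the common closed form both ports reach over an index list l
def pvF (temp_text : List String) (temp_preds : List String) (pred : String) (temp_confs : List Int) (l : List Int) : String × Int × Int :=
  let m := l.filter (fun j => PySem.List.pyGetD temp_preds j "" == pred)
  (PySem.Str.join "" (m.map (fun j => PySem.Str.replace (PySem.List.pyGetD temp_text j "") "##" "")),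
   (m.map (fun j => PySem.List.pyGetD temp_confs j 0)).sum,
   (m.length : Int))

theorem pvF_append (temp_text : List String) (temp_preds : List String) (pred : String) (temp_confs : List Int) (l1 l2 : List Int) :
    pvF temp_text temp_preds pred temp_confs (l1 ++ l2)
      = ((pvF temp_text temp_preds pred temp_confs l1).1 ++ (pvF temp_text temp_preds pred temp_confs l2).1,
         (pvF temp_text temp_preds pred temp_confs l1).2.1 + (pvF temp_text temp_preds pred temp_confs l2).2.1,
         (pvF temp_text temp_preds pred temp_confs l1).2.2 + (pvF temp_text temp_preds pred temp_confs l2).2.2) := by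
  simp [pvF, List.filter_append, str_join_empty_append]

theorem update_loop_eq (temp_text : List String) (temp_preds : List String) (pred : String)
    (temp_confs : List Int) (l : List Int) (t : String) (c k : Int) :
    l.foldl
      (fun (st : String × Int × Int) j =>
        if PySem.List.pyGetD temp_preds j "" == pred then
          (st.1 ++ PySem.Str.replace (PySem.List.pyGetD temp_text j "") "##" "",
           st.2.1 + PySem.List.pyGetD temp_confs j 0,
           st.2.2 + 1)
        else st) (t, c, k)
    = (t ++ (pvF temp_text temp_preds pred temp_confs l).1,
       c + (pvF temp_text temp_preds pred temp_confs l).2.1,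
       k + (pvF temp_text temp_preds pred temp_confs l).2.2) := by
  induction l generalizing t c k with
  | nil => simp [pvF, str_join_empty_nil]
  | cons a rest ih =>
      by_cases h : (PySem.List.pyGetD temp_preds a "" == pred) = true
      · simp only [List.foldl_cons, pvF, List.filter_cons, h, ih]
        refine Prod.ext ?_ (Prod.ext ?_ ?_)
        · simp [pvF, str_join_empty_cons, String.append_assoc]
        · simp [pvF, List.map_cons, List.sum_cons]; ring
        · simp [pvF]; ring
      · simp only [List.foldl_cons, List.filter_cons, h, ih]
        simp [pvF, h]

theorem pvSolveB_eq (temp_text : List String) (temp_preds : List String) (pred : String)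
    (temp_confs : List Int) (fuel : Nat) : ∀ (lo hi : Nat), hi - lo ≤ fuel + 1 →
    pvSolveB temp_text temp_preds pred temp_confs fuel lo hi
      = pvF temp_text temp_preds pred temp_confs (PySem.List.pyRange (lo : Int) (hi : Int) 1) := by
  induction fuel with
  | zero =>
    intro lo hi hf
    rw [pvSolveB]
    by_cases h0 : hi - lo = 0
    · have : ((hi : Int) ≤ (lo : Int)) := by omega
      simp [h0, PySem.List.pyRange_one_eq_nil this, pvF, str_join_empty_nil]
    · have h1 : hi - lo = 1 := by omega
      have hlt : ((lo : Int) < (hi : Int)) := by omega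
      have hnil : PySem.List.pyRange ((lo : Int) + 1) (hi : Int) 1 =
        [] := PySem.List.pyRange_one_eq_nil (by omega)
      rw [PySem.List.pyRange_one_cons hlt, hnil]
      simp only [h0, h1, if_false, if_true]
      by_cases hp : (PySem.List.pyGetD temp_preds (lo : Int) "" == pred) = true
      · rw [if_pos hp]
        simp only [pvF, List.filter_cons, hp, if_true, List.filter_nil, List.map_cons,
          List.map_nil, List.sum_cons, List.sum_nil, List.length_cons, List.length_nil,
          str_join_empty_cons]
        refine Prod.ext ?_ (Prod.ext ?_ ?_) <;> simp [str_join_empty_nil]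
      · rw [if_neg hp]
        simp only [pvF, List.filter_cons, hp, if_false, List.filter_nil]
        simp [str_join_empty_nil]
  | succ f ih =>
    intro lo hi hf
    rw [pvSolveB]
    by_cases h0 : hi - lo = 0
    · have : ((hi : Int) ≤ (lo : Int)) := by omega
      simp [h0, PySem.List.pyRange_one_eq_nil this, pvF, str_join_empty_nil]
    · by_cases h1 : hi - lo = 1
      · have hlt : ((lo : Int) < (hi : Int)) := by omega
        have hnil : PySem.List.pyRange ((lo : Int) + 1) (hi : Int) 1 =
          [] := PySem.List.pyRange_one_eq_nil (by omega)
        rw [PySem.List.pyRange_one_cons hlt, hnil]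
        simp only [h0, h1, if_false, if_true]
        by_cases hp : (PySem.List.pyGetD temp_preds (lo : Int) "" == pred) = true
        · rw [if_pos hp]
          simp only [pvF, List.filter_cons, hp, if_true, List.filter_nil, List.map_cons,
            List.map_nil, List.sum_cons, List.sum_nil, List.length_cons, List.length_nil,
            str_join_empty_cons]
          refine Prod.ext ?_ (Prod.ext ?_ ?_) <;> simp [str_join_empty_nil]
        · rw [if_neg hp]
          simp only [pvF, List.filter_cons, hp, if_false, List.filter_nil]
          simp [str_join_empty_nil]
      · have hmid1 : ((lo : Int) ≤ (((lo + hi) / 2 : Nat) : Int)) := by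
          have : lo ≤ (lo + hi) / 2 := by omega
          exact_mod_cast this
        have hmid2 : ((((lo + hi) / 2 : Nat) : Int) ≤ (hi : Int)) := by
          have : (lo + hi) / 2 ≤ hi := by omega
          exact_mod_cast this
        have ih1 := ih lo ((lo + hi) / 2) (by omega)
        have ih2 := ih ((lo + hi) / 2) hi (by omega)
        simp only [h0, h1, if_false]
        rw [ih1, ih2, PySem.List.pyRange_one_append (lo : Int) (((lo + hi) / 2 : Nat) : Int) (hi : Int) hmid1 hmid2, pvF_append]

-- ===== VERDICT (by name: the statement is the Claim_ definition above) =====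
theorem update_text_and_conf_spec : Claim_equal_update_text_and_conf := by
  intro temp_text text temp_preds pred conf temp_confs _ _
  show _ = _
  unfold update_text_and_conf update_text_and_conf_alt
  rw [update_loop_eq, pvSolveB_eq temp_text temp_preds pred temp_confs temp_text.length 0 temp_text.length (by omega)]
  simp
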